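-- pv_equiv track=rewrite | github.com/NAXICHEK/ege | 19-21/18144.py | f
-- ===== SOURCE A (Python) =====
-- def f(s, m):
--     if s <= 19 : return m % 2 == 0
--     if m == 0: return 0
--     h = [
--         f(s-4, m-1),
--         f(s-6, m-1),
--         f((s+1)//2, m-1)
--     ]
--     return any(h) if (m-1) % 2 == 0 else all(h)
-- ===== SOURCE B (Python) =====
-- def f(s, m):
--     # Memoized evaluation: same game recursion, but each (s, m) state is
--     # computed once and cached, instead of A's exponential tree walk.
--     memo = {}
--
--     def go(s, m):
--         key = (s, m)
--         if key in memo: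
--             return memo[key]
--         if s <= 19:
--             r = m % 2 == 0
--         elif m == 0:
--             r = False
--         else:
--             a = go(s - 4, m - 1)
--             b = go(s - 6, m - 1)
--             c = go((s + 1) // 2, m - 1)
--             r = (a or b or c) if (m - 1) % 2 == 0 else (a and b and c)
--         memo[key] = r
--         return r
--
--     return go(s, m)
-- ===== Notes on version B (the rewrite author's own statement) =====
-- stated objective: alternative
-- what changed: B memoizes the recursion on (s, m) states in a dict so each state is evaluated once, instead of A's unmemoized ternary tree walk.
-- outside the precondition, e.g. on f(25, 0): A returns 0, B returns False
import Mathlib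
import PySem

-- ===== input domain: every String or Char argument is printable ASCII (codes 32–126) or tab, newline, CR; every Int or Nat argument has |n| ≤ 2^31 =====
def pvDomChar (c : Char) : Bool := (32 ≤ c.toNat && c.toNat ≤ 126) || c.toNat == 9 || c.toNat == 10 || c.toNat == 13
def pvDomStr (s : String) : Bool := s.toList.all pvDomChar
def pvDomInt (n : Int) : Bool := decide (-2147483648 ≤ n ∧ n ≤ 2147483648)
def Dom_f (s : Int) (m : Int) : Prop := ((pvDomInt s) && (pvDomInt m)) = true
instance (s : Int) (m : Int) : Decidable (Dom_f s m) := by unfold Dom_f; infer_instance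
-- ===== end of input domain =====

-- B replaces A's exponential recursion with a memoized recursion on (s, m) states,
-- each (s, m) state computed once (objective: alternative algorithm; same values).


-- ===== PORT A =====
-- Literal port of A.  (The `m == 0` branch is where Python A returns the int 0,
-- not a bool; that input is outside Pre_f below.)
def f (s : Int) (m : Int) : Bool :=
  if s ≤ 19 then PySem.Int.mod m 2 == 0
  else if m == 0 then false
  else
    let h1 := f (s - 4) (m - 1)
    let h2 := f (s - 6) (m - 1)
    let h3 := f (PySem.Int.floordiv (s + 1) 2) (m - 1)
    if PySem.Int.mod (m - 1) 2 == 0 then h1 || h2 || h3 else h1 && h2 && h3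
termination_by s.toNat
decreasing_by
  · omega
  · omega
  · have : PySem.Int.floordiv (s + 1) 2 = (s + 1) / 2 :=
      PySem.Int.floordiv_eq_ediv_of_pos (by omega)
    omega

-- ===== PORT B =====
-- Port of B's inner `go`: the memo dict is threaded through explicitly.
def fGo (memo : PySem.Dict (Int × Int) Bool) (s : Int) (m : Int) :
    Bool × PySem.Dict (Int × Int) Bool :=
  match memo.get? (s, m) with
  | some v => (v, memo)
  | none =>
    if s ≤ 19 then
      let r := PySem.Int.mod m 2 == 0
      (r, memo.insert (s, m) r)
    else if m == 0 then
      (false, memo.insert (s, m) false)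
    else
      let p1 := fGo memo (s - 4) (m - 1)
      let p2 := fGo p1.2 (s - 6) (m - 1)
      let p3 := fGo p2.2 (PySem.Int.floordiv (s + 1) 2) (m - 1)
      let r := if PySem.Int.mod (m - 1) 2 == 0 then p1.1 || p2.1 || p3.1
               else p1.1 && p2.1 && p3.1
      (r, p3.2.insert (s, m) r)
termination_by s.toNat
decreasing_by
  · omega
  · omega
  · have : PySem.Int.floordiv (s + 1) 2 = (s + 1) / 2 :=
      PySem.Int.floordiv_eq_ediv_of_pos (by omega)
    omega

def f_alt (s : Int) (m : Int) : Bool := (fGo (PySem.Dict.ofList []) s m).1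

-- ===== PRECONDITION & SPEC =====
-- Pre_f excludes (a) s > 19 ∧ m = 0, where Python A returns the int 0 (falsy, but
-- not a value of the declared bool return type; B returns False there), and
-- (b) inputs whose s-4 recursion chain is deep enough that CPython raises
-- RecursionError before A (or B) can return: s ≥ 32019 with m outside 1..7999.
def Pre_f (s : Int) (m : Int) : Prop :=
  (s ≤ 19 ∨ m ≠ 0) ∧ (s < 32019 ∨ (0 < m ∧ m < 8000))
instance (s : Int) (m : Int) : Decidable (Pre_f s m) := by unfold Pre_f; infer_instance
def pvWitness_f : Int × Int := (25, 3)

def Spec_f (s : Int) (m : Int) (out : Bool) : Prop := out = f_alt s m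
instance (s : Int) (m : Int) (out : Bool) : Decidable (Spec_f s m out) := by
  unfold Spec_f; infer_instance

-- ===== CLAIM (what is proved, stated in full; the proofs are below) =====
def Claim_equal_f : Prop := ∀ (s : Int) (m : Int), Dom_f s m → Pre_f s m → Spec_f s m (f s m)

-- ===== LEMMAS AND PROOFS =====

-- The memo invariant: every cached value is the plain recursion's value.
def MemoOK (memo : PySem.Dict (Int × Int) Bool) : Prop :=
  ∀ k v, memo.get? k = some v → v = f k.1 k.2

lemma memoOK_insert {memo : PySem.Dict (Int × Int) Bool} {s m : Int} {r : Bool}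
    (h : MemoOK memo) (hr : r = f s m) : MemoOK (memo.insert (s, m) r) := by
  intro k v hk
  rcases eq_or_ne k (s, m) with rfl | hne
  · simp [PySem.Dict.get?_insert_self] at hk
    subst hk; exact hr
  · rw [PySem.Dict.get?_insert_of_ne] at hk
    · exact h k v hk
    · simpa [beq_iff_eq] using hne

lemma fGo_correct (memo : PySem.Dict (Int × Int) Bool) (s m : Int) :
    MemoOK memo → (fGo memo s m).1 = f s m ∧ MemoOK (fGo memo s m).2 := by
  fun_induction fGo memo s m
  all_goals intro h
  case case1 memo s m v hget =>
    exact ⟨h (s, m) v hget, h⟩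
  case case2 memo s m hget hs r =>
    have hv : r = f s m := by rw [f]; simp [hs, r]
    exact ⟨hv, memoOK_insert h hv⟩
  case case3 memo s m hget hs hm =>
    have hv : false = f s m := by rw [f]; simp [hs, hm]
    exact ⟨hv, memoOK_insert h hv⟩
  case case4 memo s m hget hs hm p1 p2 p3 r ih1 ih2 ih2b ih3 =>
    obtain ⟨e1, k1⟩ := ih1 h
    obtain ⟨e2, k2⟩ := ih2b k1
    obtain ⟨e3, k3⟩ := ih3 k2
    have hv : r = f s m := by
      conv_rhs => rw [f]
      simp only [hs, hm, if_false, p1, p2, p3, r]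
      rw [e1, e2, e3]
      simp
    exact ⟨hv, memoOK_insert k3 hv⟩

-- ===== VERDICT (by name: the statement is the Claim_ definition above) =====
theorem f_spec : Claim_equal_f := by
  intro s m _ _
  unfold Spec_f f_alt
  have h0 : MemoOK (PySem.Dict.ofList []) := by
    intro k v hk
    simp [pysem, PySem.Dict.ofList, PySem.Dict.empty, PySem.Dict.update] at hk
  exact ((fGo_correct (PySem.Dict.ofList []) s m h0).1).symm
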